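-- pv_equiv track=rewrite | github.com/LoveGalaxy/Character-Region-Awareness-for-Text-Detection- | source/dataset/datautils.py | create_affine_boxes
-- ===== SOURCE A (Python) =====
-- def box_center(points):
--     """
--         support two input ways
--         4 points: x1, y1, x2, y2, x3, y3, x4, y4
--         2 points: lt_x1, lt_y1, rd_x2, rd_y2
--     """
--     if len(points) == 4:
--         x1, y1, x2, y2 = points
--         x3, y3, x4, y4 = x2, y1, x1, y2
--     elif len(points) == 8:
--         x1, y1, x2, y2, x3, y3, x4, y4 = points
--     else:
--         raise("please input 2 points or 4 points, check it")
--     center_x = round((x1 + x2 + x3 + x4) / 4)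
--     center_y = round((y1 + y2 + y3 + y4) / 4)
--     return center_x, center_y, x1, y1, x3, y3, x2, y2, x4, y4
--
-- def triangle_center(points):
--     if len(points) == 6:
--         x1, y1, x2, y2, x3, y3 = points
--     else:
--         raise("please input 3 points, check it")
--     center_x = round((x1 + x2 + x3) / 3)
--     center_y = round((y1 + y2 + y3) / 3)
--     return center_x, center_y
--
-- def create_affine_boxes(boxes):
--     affine_boxes = []
--     if len(boxes) == 1:
--         return affine_boxes
--     for boxes_1, boxes_2 in zip(boxes[:-1], boxes[1:]):
--         center_x1, center_y1, x1, y1, x3, y3, x2, y2, x4, y4 = box_center(boxes_1)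
--         points_x1, points_y1 = triangle_center([center_x1, center_y1, x1, y1, x2, y2])
--         points_x2, points_y2 = triangle_center([center_x1, center_y1, x3, y3, x4, y4])
--         center_x2, center_y2, x1, y1, x3, y3, x2, y2, x4, y4 = box_center(boxes_2)
--         points_x3, points_y3 = triangle_center([center_x2, center_y2, x1, y1, x2, y2])
--         points_x4, points_y4 = triangle_center([center_x2, center_y2, x3, y3, x4, y4])
--         affine_boxes.append([points_x1, points_y1, points_x3, points_y3, points_x4, points_y4, points_x2, points_y2,])
--     return affine_boxes
-- ===== SOURCE B (Python) =====
-- def _pts(box):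
--     """Normalize a box to 8 coordinates, then return its two derived
--     triangle-center points (P_a, P_b) around the box center."""
--     if len(box) == 4:
--         x1, y1, x2, y2 = box
--         box = [x1, y1, x2, y2, x2, y1, x1, y2]
--     elif len(box) != 8:
--         raise ValueError("box must have 4 or 8 coordinates")
--     x1, y1, x2, y2, x3, y3, x4, y4 = box
--     cx = round((x1 + x2 + x3 + x4) / 4)
--     cy = round((y1 + y2 + y3 + y4) / 4)
--     return ((round((cx + x1 + x2) / 3), round((cy + y1 + y2) / 3)),
--             (round((cx + x3 + x4) / 3), round((cy + y3 + y4) / 3)))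
--
-- def create_affine_boxes(boxes):
--     if len(boxes) == 1:
--         return []
--     if not boxes:
--         return []
--
--     def go(prev, rest):
--         # streaming recursion: carry the previous box's derived point pair,
--         # derive each box exactly once, cons rows front-to-back
--         if not rest:
--             return []
--         cur = _pts(rest[0])
--         (ax, ay), (bx, by) = prev
--         (cx, cy), (dx, dy) = cur
--         return [[ax, ay, cx, cy, dx, dy, bx, by]] + go(cur, rest[1:])
--
--     return go(_pts(boxes[0]), boxes[1:])
-- ===== Notes on version B (the rewrite author's own statement) =====
-- stated objective: alternative
-- what changed: B replaces A's iterative loop over zip(boxes[:-1], boxes[1:]) (which recomputes box_center and both triangle_centers of every interior box twice) with a structural recursion that streams through the boxes carrying the previous box's derived point pair, deriving each box exactly once and consing the rows; boxes are normalized to 8 coordinates before one shared center computation.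
import Mathlib
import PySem

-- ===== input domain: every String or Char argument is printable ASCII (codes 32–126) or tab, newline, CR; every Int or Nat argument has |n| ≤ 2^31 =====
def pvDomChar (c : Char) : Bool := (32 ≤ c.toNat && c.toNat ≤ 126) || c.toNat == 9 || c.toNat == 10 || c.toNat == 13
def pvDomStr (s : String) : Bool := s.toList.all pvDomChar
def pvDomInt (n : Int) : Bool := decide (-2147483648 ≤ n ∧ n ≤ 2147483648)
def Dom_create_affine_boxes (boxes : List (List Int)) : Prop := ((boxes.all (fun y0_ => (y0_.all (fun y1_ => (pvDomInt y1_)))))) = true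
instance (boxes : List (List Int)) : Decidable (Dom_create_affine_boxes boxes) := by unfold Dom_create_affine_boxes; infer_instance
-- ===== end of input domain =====

-- B replaces A's loop over zip(boxes[:-1], boxes[1:]) with a streaming recursion carrying the
-- previous box's derived point pair, deriving each box once. Same return values on Pre_.

-- Exact integer model of Python round(s/4) on Dom (|s| ≤ 2^33): s/4 is an exact double, round ties to even.
def pyRoundQuarter (s : Int) : Int :=
  let q := PySem.Int.floordiv s 4
  if PySem.Int.mod s 4 = 2 then (if PySem.Int.mod q 2 = 0 then q else q + 1)
  else if PySem.Int.mod s 4 = 3 then q + 1 else q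

-- Exact integer model of Python round(s/3) on Dom (|s| ≤ 2^33): fl(s/3) is never a half-integer tie,
-- so the result is the nearest integer to s/3, i.e. floor((2*s+3)/6).
def pyRoundThird (s : Int) : Int := PySem.Int.floordiv (2 * s + 3) 6

-- ===== PORT A =====
-- box_center: none = the `raise` branch (wrong number of coordinates)
def pv_box_center (points : List Int) :
    Option (Int × Int × Int × Int × Int × Int × Int × Int × Int × Int) :=
  match points with
  | [x1, y1, x2, y2] =>
      let x3 := x2; let y3 := y1; let x4 := x1; let y4 := y2
      some (pyRoundQuarter (x1 + x2 + x3 + x4), pyRoundQuarter (y1 + y2 + y3 + y4),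
            x1, y1, x3, y3, x2, y2, x4, y4)
  | [x1, y1, x2, y2, x3, y3, x4, y4] =>
      some (pyRoundQuarter (x1 + x2 + x3 + x4), pyRoundQuarter (y1 + y2 + y3 + y4),
            x1, y1, x3, y3, x2, y2, x4, y4)
  | _ => none

def pv_triangle_center (points : List Int) : Option (Int × Int) :=
  match points with
  | [x1, y1, x2, y2, x3, y3] => some (pyRoundThird (x1 + x2 + x3), pyRoundThird (y1 + y2 + y3))
  | _ => none

def create_affine_boxes (boxes : List (List Int)) : List (List Int) :=
  if boxes.length = 1 then []
  else
    (List.zip (PySem.List.slice boxes none (some (-1))) (PySem.List.slice boxes (some 1) none)).foldl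
      (fun affine_boxes p =>
        match pv_box_center p.1, pv_box_center p.2 with
        | some (cx1, cy1, x1, y1, x3, y3, x2, y2, x4, y4),
          some (cx2, cy2, u1, v1, u3, v3, u2, v2, u4, v4) =>
            match pv_triangle_center [cx1, cy1, x1, y1, x2, y2],
                  pv_triangle_center [cx1, cy1, x3, y3, x4, y4],
                  pv_triangle_center [cx2, cy2, u1, v1, u2, v2],
                  pv_triangle_center [cx2, cy2, u3, v3, u4, v4] with
            | some (p1x, p1y), some (p2x, p2y), some (p3x, p3y), some (p4x, p4y) =>
                affine_boxes ++ [[p1x, p1y, p3x, p3y, p4x, p4y, p2x, p2y]]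
            | _, _, _, _ => affine_boxes     -- unreachable: arguments are literal 6-lists
        | _, _ => affine_boxes)              -- Python raises here; excluded by Pre_
      []

-- ===== PORT B =====
-- _pts: normalize to 8 coordinates, then one shared computation; none = the ValueError branch.
-- Tuple unpacking is ported as indexed access: every index is in range by the length test,
-- so the default 0 is never read.
def pv_pts (box : List Int) : Option ((Int × Int) × (Int × Int)) :=
  let g := fun (i : Int) => PySem.List.pyGetD box i 0
  let norm : Option (List Int) :=
    if box.length = 4 then some [g 0, g 1, g 2, g 3, g 2, g 1, g 0, g 3]
    else if box.length = 8 then some box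
    else none
  norm.map (fun l =>
    let h := fun (i : Int) => PySem.List.pyGetD l i 0
    let cx := pyRoundQuarter (h 0 + h 2 + h 4 + h 6)
    let cy := pyRoundQuarter (h 1 + h 3 + h 5 + h 7)
    ((pyRoundThird (cx + h 0 + h 2), pyRoundThird (cy + h 1 + h 3)),
     (pyRoundThird (cx + h 4 + h 6), pyRoundThird (cy + h 5 + h 7))))

-- go: streaming recursion carrying the previous box's derived pair; [] on the raise (excluded by Pre_)
def pv_go (prev : (Int × Int) × (Int × Int)) (rest : List (List Int)) : List (List Int) :=
  match rest with
  | [] => []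
  | b :: t =>
      (pv_pts b).elim []                    -- [] = Python raises here; excluded by Pre_
        (fun cur =>
          [[prev.1.1, prev.1.2, cur.1.1, cur.1.2, cur.2.1, cur.2.2, prev.2.1, prev.2.2]] ++ pv_go cur t)

def create_affine_boxes_alt (boxes : List (List Int)) : List (List Int) :=
  if boxes.length = 1 then []
  else if boxes.isEmpty then []
  else (pv_pts (PySem.List.pyGetD boxes 0 [])).elim []   -- [] = Python raises here; excluded by Pre_
         (fun p => pv_go p (boxes.drop 1))

-- ===== PRECONDITION & SPEC =====
-- Pre_ excludes exactly the inputs where A raises: two or more boxes with some box not having 4 or 8 coordinates.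
def Pre_create_affine_boxes (boxes : List (List Int)) : Prop :=
  boxes.length ≤ 1 ∨ ∀ b ∈ boxes, b.length = 4 ∨ b.length = 8
instance (boxes : List (List Int)) : Decidable (Pre_create_affine_boxes boxes) := by
  unfold Pre_create_affine_boxes; infer_instance

def pvWitness_create_affine_boxes : List (List Int) := [[0, 0, 2, 2], [1, 1, 3, 3], [0, 0, 4, 4, 8, 8, 2, 2]]

def Spec_create_affine_boxes (boxes : List (List Int)) (out : List (List Int)) : Prop := out = create_affine_boxes_alt boxes
instance (boxes : List (List Int)) (out : List (List Int)) : Decidable (Spec_create_affine_boxes boxes out) := by unfold Spec_create_affine_boxes; infer_instance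

-- ===== CLAIM (what is proved, stated in full; the proofs are below) =====
def Claim_equal_create_affine_boxes : Prop := ∀ (boxes : List (List Int)), Dom_create_affine_boxes boxes → Pre_create_affine_boxes boxes → Spec_create_affine_boxes boxes (create_affine_boxes boxes)

-- ===== LEMMAS AND PROOFS =====

-- the common reference form both ports are reduced to: one row per adjacent pair of boxes
def pvRow (p : List Int × List Int) : List Int :=
  (pv_pts p.1).elim [] (fun d1 => (pv_pts p.2).elim [] (fun d2 =>
    [d1.1.1, d1.1.2, d2.1.1, d2.1.2, d2.2.1, d2.2.2, d1.2.1, d1.2.2]))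

-- a valid box always has derived points
theorem pts_some (b : List Int) (h : b.length = 4 ∨ b.length = 8) : ∃ p, pv_pts b = some p := by
  rcases h with h | h <;> simp [pv_pts, h]

-- zip truncates to the shorter list, so zipping with the tail makes dropLast redundant
theorem zip_dropLast_tail {α : Type} (l : List α) : l.dropLast.zip l.tail = l.zip l.tail := by
  match l with
  | [] => rfl
  | [a] => rfl
  | a :: b :: t =>
      show (a, b) :: (b :: t).dropLast.zip t = (a, b) :: (b :: t).zip t
      have := zip_dropLast_tail (b :: t)
      simp only [List.tail_cons] at this
      rw [this]

-- the per-pair body of A appends exactly the reference row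
theorem body_eq (b1 b2 : List Int) (h1 : b1.length = 4 ∨ b1.length = 8)
    (h2 : b2.length = 4 ∨ b2.length = 8) (acc : List (List Int)) :
    (match pv_box_center b1, pv_box_center b2 with
      | some (cx1, cy1, x1, y1, x3, y3, x2, y2, x4, y4),
        some (cx2, cy2, u1, v1, u3, v3, u2, v2, u4, v4) =>
          match pv_triangle_center [cx1, cy1, x1, y1, x2, y2],
                pv_triangle_center [cx1, cy1, x3, y3, x4, y4],
                pv_triangle_center [cx2, cy2, u1, v1, u2, v2],
                pv_triangle_center [cx2, cy2, u3, v3, u4, v4] with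
          | some (p1x, p1y), some (p2x, p2y), some (p3x, p3y), some (p4x, p4y) =>
              acc ++ [[p1x, p1y, p3x, p3y, p4x, p4y, p2x, p2y]]
          | _, _, _, _ => acc
      | _, _ => acc) = acc ++ [pvRow (b1, b2)] := by
  match b1, h1 with
  | [_, _, _, _], _ =>
    match b2, h2 with
    | [_, _, _, _], _ => rfl
    | [_, _, _, _, _, _, _, _], _ => rfl
  | [_, _, _, _, _, _, _, _], _ =>
    match b2, h2 with
    | [_, _, _, _], _ => rfl
    | [_, _, _, _, _, _, _, _], _ => rfl

-- B's streaming recursion produces the reference rows for the adjacent pairs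
theorem go_eq (rest : List (List Int)) (b : List Int) (p : (Int × Int) × (Int × Int))
    (hb : pv_pts b = some p) (hrest : ∀ x ∈ rest, x.length = 4 ∨ x.length = 8) :
    pv_go p rest = ((b :: rest).zip rest).map pvRow := by
  induction rest generalizing b p with
  | nil => rfl
  | cons c t ih =>
      obtain ⟨q, hq⟩ := pts_some c (hrest c (by simp))
      have hrow : pvRow (b, c) =
          [p.1.1, p.1.2, q.1.1, q.1.2, q.2.1, q.2.2, p.2.1, p.2.2] := by
        simp [pvRow, hb, hq]
      simp only [List.zip_cons_cons, List.map_cons]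
      rw [pv_go, hq, Option.elim_some,
          ih c q hq (fun x hx => hrest x (by simp [hx])), ← hrow]
      rfl

-- ===== VERDICT (by name: the statement is the Claim_ definition above) =====
theorem create_affine_boxes_spec : Claim_equal_create_affine_boxes := by
  intro boxes _ hpre
  unfold Spec_create_affine_boxes create_affine_boxes create_affine_boxes_alt
  by_cases hone : boxes.length = 1
  · simp [hone]
  · simp only [hone, if_false]
    match boxes with
    | [] => rfl
    | b :: rest =>
      have hvalid : ∀ x ∈ b :: rest, x.length = 4 ∨ x.length = 8 := by
        rcases hpre with h | h
        · exfalso; simp at h; simp [h] at hone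
        · exact h
      obtain ⟨p, hp⟩ := pts_some b (hvalid b (by simp))
      rw [PySem.List.slice_to_neg_one, PySem.List.slice_from_one, zip_dropLast_tail]
      rw [PySem.List.foldl_congr_mem
          (g := fun acc (q : List Int × List Int) => acc ++ [pvRow q])
          (h := ?_)]
      · rw [PySem.List.foldl_append_singleton_eq_map, List.nil_append]
        simp [PySem.List.pyGetD, PySem.List.pyGet?, PySem.List.pyIdx?, hp,
          go_eq rest b p hp (fun x hx => hvalid x (by simp [hx]))]
      · intro acc q hq
        obtain ⟨hq1, hq2⟩ := List.of_mem_zip hq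
        exact body_eq q.1 q.2 (hvalid _ hq1) (hvalid _ (List.mem_of_mem_tail hq2)) acc
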